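-- pv_equiv track=rewrite | github.com/rayhannarindran/MagangBayu2023-OpenCV | Achmad Iqbal Akbari_5022221118_TugasOpenCV/Tugas2/Achmad Iqbal Akbari_5022221118_Tugas2.py | getBoundRect
-- ===== SOURCE A (Python) =====
-- def getBoundRect(contour):
--     minx,miny,maxx,maxy = (contour[0][0][0],contour[0][0][1],contour[0][0][0],contour[0][0][1])
--
--     for point in contour:
--         x,y = point[0][0], point[0][1]
--         if x<minx:minx=x
--         if y<miny:miny=y
--         if x>maxx:maxx=x
--         if y>maxy:maxy=y
--
--     midx = int((minx+maxx)/2)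
--     midy = int((miny+maxy)/2)
--
--     return ((minx,miny),(maxx,maxy),(midx,midy))
-- ===== SOURCE B (Python) =====
-- def getBoundRect(contour):
--     xs = [p[0][0] for p in contour]
--     ys = [p[0][1] for p in contour]
--     minx, maxx = min(xs), max(xs)
--     miny, maxy = min(ys), max(ys)
--     return ((minx, miny), (maxx, maxy),
--             (int((minx + maxx) / 2), int((miny + maxy) / 2)))
-- ===== Notes on version B (the rewrite author's own statement) =====
-- stated objective: simpler
-- what changed: Replaces A's single loop carrying four running extrema with manual comparisons by building the x and y coordinate lists and computing the four bounds with min()/max() reductions.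
-- outside the precondition, e.g. on getBoundRect([]): A raises IndexError, B raises ValueError; on getBoundRect([[[5]]]): A raises IndexError, B raises IndexError
import Mathlib
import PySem

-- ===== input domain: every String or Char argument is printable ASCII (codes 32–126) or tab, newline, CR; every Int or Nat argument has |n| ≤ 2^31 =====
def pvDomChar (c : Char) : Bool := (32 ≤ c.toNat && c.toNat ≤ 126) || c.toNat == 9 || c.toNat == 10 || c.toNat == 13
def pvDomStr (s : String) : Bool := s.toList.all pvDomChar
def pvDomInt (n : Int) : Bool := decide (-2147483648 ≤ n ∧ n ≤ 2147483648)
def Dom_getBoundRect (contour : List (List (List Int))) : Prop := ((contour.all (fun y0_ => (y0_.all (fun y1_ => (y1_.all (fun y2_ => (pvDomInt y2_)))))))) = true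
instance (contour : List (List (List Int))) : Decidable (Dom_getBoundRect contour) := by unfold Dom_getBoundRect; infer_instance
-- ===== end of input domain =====

-- B replaces A's single manual-comparison loop by building the x/y coordinate lists and taking four min/max reductions (objective: simpler).


-- ===== PORT A =====
-- point[0][0] / point[0][1]; exact under Pre_ (indices in range), defaults unused inside Pre_
def pvPX (point : List (List Int)) : Int := PySem.List.pyGetD (PySem.List.pyGetD point 0 []) 0 0
def pvPY (point : List (List Int)) : Int := PySem.List.pyGetD (PySem.List.pyGetD point 0 []) 1 0

-- int((a+b)/2) in Python truncates toward zero; exact as Int.tdiv on the Dom-bounded ints (float is exact there)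
def getBoundRect (contour : List (List (List Int))) : (Int × Int) × (Int × Int) × (Int × Int) :=
  let p0 := PySem.List.pyGetD contour 0 []
  let s := contour.foldl
    (fun (st : Int × Int × Int × Int) point =>
      let x := pvPX point
      let y := pvPY point
      let minx := if x < st.1 then x else st.1
      let miny := if y < st.2.1 then y else st.2.1
      let maxx := if x > st.2.2.1 then x else st.2.2.1
      let maxy := if y > st.2.2.2 then y else st.2.2.2
      (minx, miny, maxx, maxy))
    (pvPX p0, pvPY p0, pvPX p0, pvPY p0)
  ((s.1, s.2.1), (s.2.2.1, s.2.2.2),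
   (Int.tdiv (s.1 + s.2.2.1) 2, Int.tdiv (s.2.1 + s.2.2.2) 2))

-- ===== PORT B =====
def getBoundRect_alt (contour : List (List (List Int))) : (Int × Int) × (Int × Int) × (Int × Int) :=
  let xs := contour.map pvPX
  let ys := contour.map pvPY
  let minx := (PySem.List.min? xs (fun v => v)).getD 0
  let maxx := (PySem.List.max? xs (fun v => v)).getD 0
  let miny := (PySem.List.min? ys (fun v => v)).getD 0
  let maxy := (PySem.List.max? ys (fun v => v)).getD 0
  ((minx, miny), (maxx, maxy),
   (Int.tdiv (minx + maxx) 2, Int.tdiv (miny + maxy) 2))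

-- ===== PRECONDITION & SPEC =====
-- Pre_ excludes exactly the inputs where the Python A raises IndexError: an empty contour,
-- or a point lacking point[0][0]/point[0][1] (B raises there too: ValueError/IndexError).
def Pre_getBoundRect (contour : List (List (List Int))) : Prop :=
  contour ≠ [] ∧ ∀ p ∈ contour, 2 ≤ (p.headD []).length
instance (contour : List (List (List Int))) : Decidable (Pre_getBoundRect contour) := by
  unfold Pre_getBoundRect; infer_instance
def pvWitness_getBoundRect : List (List (List Int)) := [[[1, -5]], [[3, 2]], [[-2, 8]]]

def Spec_getBoundRect (contour : List (List (List Int))) (out : (Int × Int) × (Int × Int) × (Int × Int)) : Prop := out = getBoundRect_alt contour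
instance (contour : List (List (List Int))) (out : (Int × Int) × (Int × Int) × (Int × Int)) : Decidable (Spec_getBoundRect contour out) := by unfold Spec_getBoundRect; infer_instance

-- ===== CLAIM (what is proved, stated in full; the proofs are below) =====
def Claim_equal_getBoundRect : Prop := ∀ (contour : List (List (List Int))), Dom_getBoundRect contour → Pre_getBoundRect contour → Spec_getBoundRect contour (getBoundRect contour)

-- ===== LEMMAS AND PROOFS =====

theorem pvFold_split (t : List (List (List Int))) (a b c d : Int) :
    t.foldl
      (fun (st : Int × Int × Int × Int) point =>
        (if pvPX point < st.1 then pvPX point else st.1,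
         if pvPY point < st.2.1 then pvPY point else st.2.1,
         if pvPX point > st.2.2.1 then pvPX point else st.2.2.1,
         if pvPY point > st.2.2.2 then pvPY point else st.2.2.2))
      (a, b, c, d) =
      (t.foldl (fun m p => min m (pvPX p)) a,
       t.foldl (fun m p => min m (pvPY p)) b,
       t.foldl (fun m p => max m (pvPX p)) c,
       t.foldl (fun m p => max m (pvPY p)) d) := by
  induction t generalizing a b c d with
  | nil => rfl
  | cons h t ih =>
    simp only [List.foldl_cons, ih]
    congr 1 <;> [skip; congr 1] <;> [skip; skip; congr 1] <;>
      · congr 1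
        simp only [min_def, max_def]
        split_ifs <;> omega

theorem getBoundRect_spec_aux (contour : List (List (List Int))) (h : contour ≠ []) :
    getBoundRect contour = getBoundRect_alt contour := by
  obtain ⟨p, t, rfl⟩ := List.exists_cons_of_ne_nil h
  simp only [getBoundRect, getBoundRect_alt, PySem.List.pyGetD_zero_cons,
    List.foldl_cons, List.map_cons, PySem.List.min?_id_cons, PySem.List.max?_id_cons,
    Option.getD_some, List.foldl_map, lt_self_iff_false, gt_iff_lt, if_false,
    pvFold_split]

-- ===== VERDICT (by name: the statement is the Claim_ definition above) =====
theorem getBoundRect_spec : Claim_equal_getBoundRect := by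
  intro contour _ hpre
  unfold Spec_getBoundRect
  exact getBoundRect_spec_aux contour hpre.1
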